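-- pv_equiv track=rewrite | github.com/chrisluo5311/pythonHomeWork | week5/mystr.py | str_slicing
-- ===== SOURCE A (Python) =====
-- def str_slicing(n,str1,str2):
--     strList = [str1, str2]
--
--     lower_str = ""
--     upperCount = 0
--     alphaCount = 0
--     str_longest = ""
--     for j in strList:
--         lower_str += concat_lowercase(j)
--         upperCount += count_uppercase(j)
--         alphaCount += count_alpha(j)
--         str_list = j.split(" ")
--         str_longest = find_longest(str_list,str_longest)
--
--
--     # 小寫 大寫 字元數 最長字
--     if lower_str != "":
--         return lower_str,upperCount,alphaCount,str_longest
--     else: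
--         return "No lowercase letters",upperCount,alphaCount,str_longest
--
-- def concat_lowercase(x=""):
--     str_concat = ""
--     for i in x:
--         if i.islower():
--             str_concat += i
--     return str_concat
--
-- def count_uppercase(x=""):
--     count = 0
--     for i in x:
--         if i.isupper():
--             count += 1
--     return count
--
-- def count_alpha(x=""):
--     count = len(x)
--     return count
--
-- def find_longest(x,str_longest):
--     longest_num = 0
--     longest_str = ""
--     for i in x:
--         if len(i) > longest_num:
--             longest_num = len(i)
--             longest_str = i
--
--     if len(longest_str) > len(str_longest):
--         return longest_str
--     else:
--         return str_longest
-- ===== SOURCE B (Python) =====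
-- def str_slicing(n, str1, str2):
--     lower_chars = []
--     upper = 0
--     total = 0
--     words = []
--     for s in (str1, str2):
--         total += len(s)
--         words += s.split(" ")
--         for c in s:
--             if c.islower():
--                 lower_chars.append(c)
--             elif c.isupper():
--                 upper += 1
--     longest = max(words, key=len, default="")
--     lower_str = "".join(lower_chars)
--     return (lower_str or "No lowercase letters", upper, total, longest)
-- ===== Notes on version B (the rewrite author's own statement) =====
-- stated objective: simpler
-- what changed: A makes four separate helper scans per string (lowercase concat, uppercase count, len, a per-string longest-word fold chained through find_longest); B does one combined character pass per string collecting lowercase and uppercase together, accumulates the word lists, and picks the longest word with a single max(words, key=len) over the concatenated list.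
import Mathlib
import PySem

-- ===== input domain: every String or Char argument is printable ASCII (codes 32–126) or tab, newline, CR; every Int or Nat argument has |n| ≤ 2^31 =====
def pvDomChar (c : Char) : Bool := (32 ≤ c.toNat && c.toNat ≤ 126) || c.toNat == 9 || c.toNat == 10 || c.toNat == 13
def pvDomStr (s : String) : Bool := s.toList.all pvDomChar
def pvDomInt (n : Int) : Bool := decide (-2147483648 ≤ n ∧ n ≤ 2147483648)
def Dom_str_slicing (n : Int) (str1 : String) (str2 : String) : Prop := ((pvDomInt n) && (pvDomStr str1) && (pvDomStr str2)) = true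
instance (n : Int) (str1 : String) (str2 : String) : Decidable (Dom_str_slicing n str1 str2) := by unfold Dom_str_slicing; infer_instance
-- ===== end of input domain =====

-- B replaces A's four separate per-string helper scans by one combined character pass per
-- string plus a single max(words, key=len) over the concatenated word list (objective: simpler).

-- ===== PORT A =====
def concat_lowercase (x : List Char) : List Char :=
  x.foldl (fun str_concat i => if PySem.Chars.islower i then str_concat ++ [i] else str_concat) []

def count_uppercase (x : List Char) : Int :=
  x.foldl (fun count i => if PySem.Chars.isupper i then count + 1 else count) 0

def count_alpha (x : List Char) : Int := PySem.Chars.len x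

def find_longest (x : List (List Char)) (str_longest : List Char) : List Char :=
  let st := x.foldl (fun (st : Int × List Char) i =>
      if PySem.Chars.len i > st.1 then (PySem.Chars.len i, i) else st) (0, [])
  if PySem.Chars.len st.2 > PySem.Chars.len str_longest then st.2 else str_longest

def str_slicing (n : Int) (str1 : String) (str2 : String) : String × Int × Int × String :=
  let strList : List (List Char) := [str1.toList, str2.toList]
  let st := strList.foldl
    (fun (st : List Char × Int × Int × List Char) j =>
      (st.1 ++ concat_lowercase j,
       st.2.1 + count_uppercase j,
       st.2.2.1 + count_alpha j,
       find_longest (PySem.Chars.splitOn j [' ']) st.2.2.2))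
    ([], 0, 0, [])
  if st.1 ≠ [] then (String.ofList st.1, st.2.1, st.2.2.1, String.ofList st.2.2.2)
  else ("No lowercase letters", st.2.1, st.2.2.1, String.ofList st.2.2.2)

-- ===== PORT B =====
def str_slicing_alt (_n : Int) (str1 : String) (str2 : String) : String × Int × Int × String :=
  let st := [str1.toList, str2.toList].foldl
    (fun (st : (List Char × Int) × Int × List (List Char)) s =>
      ((s.foldl (fun (p : List Char × Int) c =>
          if PySem.Chars.islower c then (p.1 ++ [c], p.2)
          else if PySem.Chars.isupper c then (p.1, p.2 + 1)
          else p) st.1),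
       st.2.1 + PySem.Chars.len s,
       st.2.2 ++ PySem.Chars.splitOn s [' ']))
    (([], 0), 0, [])
  let longest := PySem.List.maxD st.2.2 (fun w => PySem.Chars.len w) []
  (if st.1.1 = [] then "No lowercase letters" else String.ofList st.1.1,
   st.1.2, st.2.1, String.ofList longest)

-- ===== PRECONDITION & SPEC =====
def Spec_str_slicing (n : Int) (str1 : String) (str2 : String) (out : String × Int × Int × String) : Prop := out = str_slicing_alt n str1 str2
instance (n : Int) (str1 : String) (str2 : String) (out : String × Int × Int × String) : Decidable (Spec_str_slicing n str1 str2 out) := by unfold Spec_str_slicing; infer_instance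

-- ===== CLAIM (what is proved, stated in full; the proofs are below) =====
def Claim_equal_str_slicing : Prop := ∀ (n : Int) (str1 : String) (str2 : String), Dom_str_slicing n str1 str2 → Spec_str_slicing n str1 str2 (str_slicing n str1 str2)

-- ===== LEMMAS AND PROOFS =====

-- the running "keep the strictly longer word, first wins" step both programs reduce to
def pvStep (b w : List Char) : List Char :=
  if PySem.Chars.len b < PySem.Chars.len w then w else b

theorem pvStep_nil_left (w : List Char) : pvStep [] w = w := by
  cases w <;> simp [pvStep, PySem.Chars.len]

theorem pvStep_assoc (a b c : List Char) :
    pvStep (pvStep a b) c = pvStep a (pvStep b c) := by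
  simp only [pvStep, PySem.Chars.len_eq]
  split_ifs <;> first | rfl | omega

theorem pvFoldl_step_shift (x : List (List Char)) (p : List Char) :
    x.foldl pvStep p = pvStep p (x.foldl pvStep []) := by
  induction x generalizing p with
  | nil => simp [pvStep, PySem.Chars.len]
  | cons w t ih =>
      simp only [List.foldl_cons]
      rw [ih (pvStep p w), ih (pvStep [] w), pvStep_nil_left, pvStep_assoc]

-- A's find_longest in terms of pvStep
theorem find_longest_eq (x : List (List Char)) (prev : List Char) :
    find_longest x prev = pvStep prev (x.foldl pvStep []) := by
  have h : ∀ (x : List (List Char)) (st : Int × List Char), st.1 = PySem.Chars.len st.2 →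
      x.foldl (fun (st : Int × List Char) i =>
        if PySem.Chars.len i > st.1 then (PySem.Chars.len i, i) else st) st
      = (PySem.Chars.len (x.foldl pvStep st.2), x.foldl pvStep st.2) := by
    intro x
    induction x with
    | nil =>
        intro st hst
        simp only [List.foldl_nil]
        exact Prod.ext hst rfl
    | cons w t ih =>
        intro st hst
        simp only [List.foldl_cons, pvStep]
        by_cases hlt : PySem.Chars.len w > st.1
        · rw [if_pos hlt, if_pos (by rw [← hst]; exact hlt), ih (PySem.Chars.len w, w) rfl]
        · rw [if_neg hlt, if_neg (by rw [← hst]; exact hlt), ih st hst]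
  unfold find_longest
  rw [h x (0, []) (by simp [PySem.Chars.len])]
  simp only [pvStep, gt_iff_lt]

-- B's maxD step merges the first two elements with pvStep
theorem maxD_cons_cons (x w : List Char) (s : List (List Char)) :
    PySem.List.maxD (x :: w :: s) (fun v => PySem.Chars.len v) []
      = PySem.List.maxD (pvStep x w :: s) (fun v => PySem.Chars.len v) [] := by
  simp only [PySem.List.maxD, PySem.List.max?, List.foldl_cons, pvStep]
  split_ifs <;> rfl

-- B's maxD in terms of pvStep
theorem maxD_eq_foldl_step (l : List (List Char)) :
    PySem.List.maxD l (fun v => PySem.Chars.len v) [] = l.foldl pvStep [] := by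
  cases l with
  | nil => rfl
  | cons x t =>
      induction t generalizing x with
      | nil =>
          simp only [PySem.List.maxD, PySem.List.max?, List.foldl_cons, List.foldl_nil,
            Option.getD_some, pvStep_nil_left]
      | cons w s ih =>
          rw [maxD_cons_cons, ih (pvStep x w)]
          simp only [List.foldl_cons, pvStep_nil_left]

-- a lowercase ASCII char is not uppercase
theorem islower_not_isupper (c : Char) (h : PySem.Chars.islower c = true) :
    PySem.Chars.isupper c = false := by
  simp only [PySem.Chars.islower, Bool.and_eq_true, decide_eq_true_eq] at h
  simp only [PySem.Chars.isupper, Bool.and_eq_false_iff, decide_eq_false_iff_not]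
  right
  intro hc
  exact absurd (h.1.trans hc) (by decide)

-- A's concat_lowercase is a filter
theorem concat_lowercase_eq (s : List Char) :
    concat_lowercase s = s.filter PySem.Chars.islower := by
  unfold concat_lowercase
  rw [PySem.List.foldl_append_if_eq_filter]
  rfl

-- A's count_uppercase is a countP
theorem count_uppercase_eq (s : List Char) :
    count_uppercase s = (s.countP PySem.Chars.isupper : Int) := by
  unfold count_uppercase
  rw [PySem.List.foldl_if_add_one]
  simp

-- B's combined character scan splits into A's two separate scans
theorem scan_pair (s : List Char) (lo : List Char) (up : Int) :
    s.foldl (fun (p : List Char × Int) c =>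
        if PySem.Chars.islower c then (p.1 ++ [c], p.2)
        else if PySem.Chars.isupper c then (p.1, p.2 + 1)
        else p) (lo, up)
    = (lo ++ s.filter PySem.Chars.islower, up + (s.countP PySem.Chars.isupper : Int)) := by
  induction s generalizing lo up with
  | nil => simp
  | cons c t ih =>
      simp only [List.foldl_cons]
      by_cases hl : PySem.Chars.islower c = true
      · rw [if_pos hl, ih]
        simp [hl, islower_not_isupper c hl]
      · rw [if_neg hl]
        by_cases hu : PySem.Chars.isupper c = true
        · rw [if_pos hu, ih]
          simp only [List.filter_cons, List.countP_cons, hl, hu, Bool.false_eq_true,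
            if_false, if_true, Prod.mk.injEq, true_and]
          push_cast
          ring
        · rw [if_neg hu, ih]
          simp [hl, hu]

-- ===== VERDICT (by name: the statement is the Claim_ definition above) =====
theorem str_slicing_spec : Claim_equal_str_slicing := by
  intro n str1 str2 _
  show str_slicing n str1 str2 = str_slicing_alt n str1 str2
  unfold str_slicing str_slicing_alt
  simp only [List.foldl_cons, List.foldl_nil, scan_pair]
  rw [maxD_eq_foldl_step]
  simp only [List.nil_append, List.foldl_append]
  rw [find_longest_eq, find_longest_eq, pvStep_nil_left,
      pvFoldl_step_shift (PySem.Chars.splitOn str2.toList [' '])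
        (List.foldl pvStep [] (PySem.Chars.splitOn str1.toList [' ']))]
  simp only [concat_lowercase_eq, count_uppercase_eq, count_alpha]
  by_cases hL : str1.toList.filter PySem.Chars.islower ++ str2.toList.filter PySem.Chars.islower = [] <;>
    simp [hL]
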